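-- pv_equiv track=rewrite | github.com/lvalukvlad/AOIS | LAB7/source/matrix_operations/arithmetic.py | perform_arithmetic
-- ===== SOURCE A (Python) =====
-- from typing import List
--
-- def binary_sum(operand_a: List[int], operand_b: List[int]) -> List[int]:
--     sum_result = [0] * 5
--     carry_flag = 0
--     for bit_position in range(3, -1, -1):
--         bit_sum = operand_a[bit_position] + operand_b[bit_position] + carry_flag
--         sum_result[bit_position + 1] = bit_sum % 2
--         carry_flag = bit_sum // 2
--
--     sum_result[0] = carry_flag
--     return sum_result
--
-- def perform_arithmetic(matrix_data: List[List[int]], key_value: List[int]) -> List[List[int]]: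
--     V_FIELD_LEN = 3
--     A_FIELD_LEN = 4
--     B_FIELD_LEN = 4
--     S_FIELD_LEN = 5
--
--     matching_columns = []
--     for col_idx in range(len(matrix_data[0])):
--         is_match = True
--         for bit_pos in range(len(key_value)):
--             if matrix_data[bit_pos][col_idx] != key_value[bit_pos]:
--                 is_match = False
--                 break
--         if is_match:
--             matching_columns.append(col_idx)
--
--     for col_idx in matching_columns:
--         a_field = [matrix_data[bit_pos][col_idx]
--                    for bit_pos in range(V_FIELD_LEN, V_FIELD_LEN + A_FIELD_LEN)]
--
--         b_field = [matrix_data[bit_pos][col_idx]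
--                    for bit_pos in range(V_FIELD_LEN + A_FIELD_LEN,
--                                         V_FIELD_LEN + A_FIELD_LEN + B_FIELD_LEN)]
--
--         sum_result = binary_sum(a_field, b_field)
--         for bit_pos in range(S_FIELD_LEN):
--             matrix_data[V_FIELD_LEN + A_FIELD_LEN + B_FIELD_LEN + bit_pos][col_idx] = sum_result[bit_pos]
--
--     return matrix_data
-- ===== SOURCE B (Python) =====
-- from typing import List
--
-- def perform_arithmetic(matrix_data: List[List[int]], key_value: List[int]) -> List[List[int]]:
--     # Single fused pass: for each column, test the key prefix and, on a match,
--     # add the two 4-bit fields as integers and write the 5-bit sum back in place.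
--     for col in range(len(matrix_data[0])):
--         if any(matrix_data[i][col] != key_value[i] for i in range(len(key_value))):
--             continue
--         a = 0
--         for row in range(3, 7):
--             a = 2 * a + matrix_data[row][col]
--         b = 0
--         for row in range(7, 11):
--             b = 2 * b + matrix_data[row][col]
--         s = a + b
--         matrix_data[11][col] = s // 16
--         for row in range(12, 16):
--             matrix_data[row][col] = (s // 2 ** (15 - row)) % 2
--     return matrix_data
-- ===== Notes on version B (the rewrite author's own statement) =====
-- stated objective: simpler
-- what changed: The two phases (collect matching columns, then ripple-carry add bit by bit) are fused into one pass over columns, and the hand-written ripple-carry adder is replaced by decoding the two 4-bit fields as integers, adding them, and writing the 5-bit sum back via floor-division/mod.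
import Mathlib
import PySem

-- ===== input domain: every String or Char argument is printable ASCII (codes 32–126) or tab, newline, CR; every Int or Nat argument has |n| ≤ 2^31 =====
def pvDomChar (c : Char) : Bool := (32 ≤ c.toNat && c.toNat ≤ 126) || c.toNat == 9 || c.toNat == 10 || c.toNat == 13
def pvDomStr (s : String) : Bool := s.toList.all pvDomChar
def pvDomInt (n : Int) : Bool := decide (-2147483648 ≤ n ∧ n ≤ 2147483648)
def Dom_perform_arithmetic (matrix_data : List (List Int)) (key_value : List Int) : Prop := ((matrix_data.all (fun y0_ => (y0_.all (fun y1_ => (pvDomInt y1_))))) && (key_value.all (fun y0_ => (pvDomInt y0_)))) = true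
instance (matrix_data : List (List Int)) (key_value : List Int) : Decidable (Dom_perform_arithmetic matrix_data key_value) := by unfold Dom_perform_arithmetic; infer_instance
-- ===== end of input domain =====

-- B fuses A's two passes into one and replaces the ripple-carry adder by integer
-- decode/add/re-encode of the two 4-bit fields (objective: simpler). Return value only:
-- both Pythons mutate matrix_data in place identically (same cells, same values).

-- shared primitive for Python's m[r][c] read and m[r][c] = v write (all indices in both
-- programs are nonnegative range values and in range inside Pre_, so getD/set are exact)
def getRC (m : List (List Int)) (r c : Nat) : Int := (m.getD r []).getD c 0
def setRC (m : List (List Int)) (r c : Nat) (v : Int) : List (List Int) :=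
  m.modify r (fun row => row.set c v)

-- ===== PORT A =====
def binary_sum (operand_a operand_b : List Int) : List Int :=
  let st := [3, 2, 1, 0].foldl
    (fun (st : List Int × Int) bp =>
      let bit_sum := operand_a.getD bp 0 + operand_b.getD bp 0 + st.2
      (st.1.set (bp + 1) (PySem.Int.mod bit_sum 2), PySem.Int.floordiv bit_sum 2))
    ([0, 0, 0, 0, 0], 0)
  st.1.set 0 st.2

-- inner matching loop of A, with its `break`
def matchLoop (m : List (List Int)) (key : List Int) (c : Nat) : List Nat → Bool
  | [] => true
  | bp :: rest => if getRC m bp c ≠ key.getD bp 0 then false else matchLoop m key c rest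

-- body of A's second loop (process one matching column)
def astep (md : List (List Int)) (c : Nat) : List (List Int) :=
  let a_field := (List.range 4).map (fun i => getRC md (3 + i) c)
  let b_field := (List.range 4).map (fun i => getRC md (7 + i) c)
  let sum_result := binary_sum a_field b_field
  (List.range 5).foldl (fun md2 bp => setRC md2 (11 + bp) c (sum_result.getD bp 0)) md

def perform_arithmetic (matrix_data : List (List Int)) (key_value : List Int) : List (List Int) :=
  let width := (matrix_data.getD 0 []).length
  let matching_columns := (List.range width).foldl
    (fun acc c => if matchLoop matrix_data key_value c (List.range key_value.length)
                  then acc ++ [c] else acc) []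
  matching_columns.foldl astep matrix_data

-- ===== PORT B =====
-- body of B's single fused loop (one column: test key prefix, then decode/add/encode)
def bstep (key : List Int) (md : List (List Int)) (c : Nat) : List (List Int) :=
  if (List.range key.length).any (fun i => getRC md i c ≠ key.getD i 0) then md
  else
    let a := (List.range 4).foldl (fun acc i => 2 * acc + getRC md (3 + i) c) 0
    let b := (List.range 4).foldl (fun acc i => 2 * acc + getRC md (7 + i) c) 0
    let s := a + b
    let md1 := setRC md 11 c (PySem.Int.floordiv s 16)
    (List.range 4).foldl
      (fun m2 i => setRC m2 (12 + i) c (PySem.Int.mod (PySem.Int.floordiv s (2 ^ (3 - i))) 2)) md1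

def perform_arithmetic_alt (matrix_data : List (List Int)) (key_value : List Int) : List (List Int) :=
  (List.range (matrix_data.getD 0 []).length).foldl (bstep key_value) matrix_data

-- ===== PRECONDITION & SPEC =====
-- Pre_ = exactly where Python A returns normally: the matrix is non-empty, and for each
-- column the key scan never steps past the end of a row (a cell is only read once all
-- earlier key rows of that column were long enough and matched), and a fully matching
-- column has the key within the rows and rows 3..15 long enough for the read/write-back.
def Pre_perform_arithmetic (matrix_data : List (List Int)) (key_value : List Int) : Prop :=
  matrix_data ≠ [] ∧
  ∀ c ∈ List.range (matrix_data.headD []).length,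
    (∀ i ∈ List.range (min key_value.length matrix_data.length),
        (∀ j ∈ List.range i, c < (matrix_data.getD j []).length ∧
            (matrix_data.getD j []).getD c 0 = key_value.getD j 0) →
        c < (matrix_data.getD i []).length) ∧
    ((∀ i ∈ List.range (min key_value.length matrix_data.length),
        c < (matrix_data.getD i []).length ∧
          (matrix_data.getD i []).getD c 0 = key_value.getD i 0) →
      key_value.length ≤ matrix_data.length ∧ 16 ≤ matrix_data.length ∧
        ∀ r ∈ List.range 13, c < (matrix_data.getD (3 + r) []).length)
instance (matrix_data : List (List Int)) (key_value : List Int) : Decidable (Pre_perform_arithmetic matrix_data key_value) := by unfold Pre_perform_arithmetic; infer_instance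

def pvWitness_perform_arithmetic : List (List Int) × List Int := ([[1]], [0])

def Spec_perform_arithmetic (matrix_data : List (List Int)) (key_value : List Int) (out : List (List Int)) : Prop := out = perform_arithmetic_alt matrix_data key_value
instance (matrix_data : List (List Int)) (key_value : List Int) (out : List (List Int)) : Decidable (Spec_perform_arithmetic matrix_data key_value out) := by unfold Spec_perform_arithmetic; infer_instance

-- ===== CLAIM (what is proved, stated in full; the proofs are below) =====
def Claim_equal_perform_arithmetic : Prop := ∀ (matrix_data : List (List Int)) (key_value : List Int), Dom_perform_arithmetic matrix_data key_value → Pre_perform_arithmetic matrix_data key_value → Spec_perform_arithmetic matrix_data key_value (perform_arithmetic matrix_data key_value)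

-- ===== LEMMAS AND PROOFS =====

-- writing at column c does not change reads at any other column
lemma getRC_setRC_ne (m : List (List Int)) (r c : Nat) (v : Int) (r' c' : Nat)
    (hc : c' ≠ c) : getRC (setRC m r c v) r' c' = getRC m r' c' := by
  unfold getRC setRC
  rcases eq_or_ne r' r with rfl | hr
  · cases h : m[r']? with
    | none => simp [List.getD_eq_getElem?_getD, h]
    | some row => simp [List.getD_eq_getElem?_getD, h, Ne.symm hc]
  · simp [List.getD_eq_getElem?_getD, Ne.symm hr]

-- hence A's write-back for column c does not change reads at any other column
lemma getRC_astep_ne (md : List (List Int)) (c : Nat) (r c' : Nat) (hc : c' ≠ c) :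
    getRC (astep md c) r c' = getRC md r c' := by
  simp [astep, List.range_succ, getRC_setRC_ne, hc]

-- A's break-loop is the negated any-mismatch test of B
lemma matchLoop_eq_not_any (m : List (List Int)) (key : List Int) (c : Nat) (L : List Nat) :
    matchLoop m key c L = ! L.any (fun i => getRC m i c ≠ key.getD i 0) := by
  induction L with
  | nil => rfl
  | cons bp rest ih =>
      by_cases h : getRC m bp c ≠ key.getD bp 0 <;> simp [matchLoop, h, ih]

-- the ripple-carry adder in closed form: floor-div/mod digits of the weighted sum
lemma binary_sum_closed (a0 a1 a2 a3 b0 b1 b2 b3 : Int) :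
    binary_sum [a0, a1, a2, a3] [b0, b1, b2, b3] =
      [PySem.Int.floordiv ((8*a0+4*a1+2*a2+a3) + (8*b0+4*b1+2*b2+b3)) 16,
       PySem.Int.mod (PySem.Int.floordiv ((8*a0+4*a1+2*a2+a3) + (8*b0+4*b1+2*b2+b3)) 8) 2,
       PySem.Int.mod (PySem.Int.floordiv ((8*a0+4*a1+2*a2+a3) + (8*b0+4*b1+2*b2+b3)) 4) 2,
       PySem.Int.mod (PySem.Int.floordiv ((8*a0+4*a1+2*a2+a3) + (8*b0+4*b1+2*b2+b3)) 2) 2,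
       PySem.Int.mod ((8*a0+4*a1+2*a2+a3) + (8*b0+4*b1+2*b2+b3)) 2] := by
  norm_num [binary_sum, List.set]
  refine ⟨?_, ?_, ?_, ?_, ?_⟩ <;> omega

-- when the key matches, B's fused body computes exactly A's body
lemma bstep_matched (key : List Int) (md : List (List Int)) (c : Nat)
    (h : ((List.range key.length).any (fun i => getRC md i c ≠ key.getD i 0)) = false) :
    bstep key md c = astep md c := by
  unfold bstep astep
  simp only [h, Bool.false_eq_true, if_false]
  norm_num [List.range_succ, binary_sum_closed]
  ring_nf

-- B's single fused pass equals A's filter-then-write two phases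
lemma fused_loop (m : List (List Int)) (key : List Int) :
    ∀ (L : List Nat) (md : List (List Int)), L.Nodup →
      (∀ c ∈ L, ∀ r, getRC md r c = getRC m r c) →
      L.foldl (bstep key) md
        = (L.filter (fun c => matchLoop m key c (List.range key.length))).foldl astep md := by
  intro L
  induction L with
  | nil => intro md _ _; rfl
  | cons c L' ih =>
    intro md hnd hagree
    have hcol : ∀ r, getRC md r c = getRC m r c := hagree c (by simp)
    have hguard : ((List.range key.length).any (fun i => getRC md i c ≠ key.getD i 0))
        = ((List.range key.length).any (fun i => getRC m i c ≠ key.getD i 0)) := by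
      congr 1; funext i; simp [hcol i]
    have hnd' : L'.Nodup := (List.nodup_cons.mp hnd).2
    have hcne : c ∉ L' := (List.nodup_cons.mp hnd).1
    have hrest : ∀ c' ∈ L', ∀ r, getRC md r c' = getRC m r c' :=
      fun c' hc' => hagree c' (by simp [hc'])
    cases hb : ((List.range key.length).any (fun i => getRC md i c ≠ key.getD i 0)) with
    | true =>
      have hm : matchLoop m key c (List.range key.length) = false := by
        rw [matchLoop_eq_not_any, ← hguard, hb]; rfl
      have hstep : bstep key md c = md := by simp only [bstep, hb, if_true]
      simp only [List.foldl_cons, hstep, List.filter_cons, hm, Bool.false_eq_true, if_false]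
      exact ih md hnd' hrest
    | false =>
      have hm : matchLoop m key c (List.range key.length) = true := by
        rw [matchLoop_eq_not_any, ← hguard, hb]; rfl
      have hstep : bstep key md c = astep md c := bstep_matched key md c hb
      simp only [List.foldl_cons, hstep, List.filter_cons, hm, if_true]
      refine ih (astep md c) hnd' ?_
      intro c' hc' r
      rw [getRC_astep_ne md c r c' (fun e => hcne (e ▸ hc'))]
      exact hrest c' hc' r

-- ===== VERDICT (by name: the statement is the Claim_ definition above) =====
theorem perform_arithmetic_spec : Claim_equal_perform_arithmetic := by
  intro matrix_data key_value _ _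
  unfold Spec_perform_arithmetic perform_arithmetic perform_arithmetic_alt
  dsimp only
  rw [PySem.List.foldl_append_if_eq_filter, List.nil_append]
  exact (fused_loop matrix_data key_value (List.range _) matrix_data List.nodup_range
    (fun _ _ _ => rfl)).symm
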